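-- pv_equiv track=rewrite | github.com/sunyuzheng/kedaibiao-srt-v2 | tools/correct/correct_srt.py | _extract_minimal
-- ===== SOURCE A (Python) =====
-- def _extract_minimal(orig: str, corr: str, flag_patterns: set) -> tuple[str, str] | None:
--     if orig == corr or not orig or not corr:
--         return None
--     for pat in sorted(flag_patterns, key=len, reverse=True):
--         pos = orig.find(pat)
--         if pos == -1:
--             continue
--         prefix = orig[:pos]
--         suffix = orig[pos + len(pat):]
--         if corr.startswith(prefix) and (not suffix or corr.endswith(suffix)):
--             end = len(corr) - len(suffix) if suffix else len(corr)
--             corr_pat = corr[len(prefix):end]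
--             if corr_pat and corr_pat != pat:
--                 return pat, corr_pat
--     return None
-- ===== SOURCE B (Python) =====
-- def _extract_minimal(orig: str, corr: str, flag_patterns: set) -> tuple[str, str] | None:
--     if orig == corr or not orig or not corr:
--         return None
--
--     def candidate(pat):
--         pos = orig.find(pat)
--         if pos == -1:
--             return None
--         after = orig[pos + len(pat):]
--         if not corr.startswith(orig[:pos]) or (after and not corr.endswith(after)):
--             return None
--         # len(orig[:pos]) == pos, and len(corr)-len(after) == len(corr) when after == ''
--         mid = corr[pos:len(corr) - len(after)]
--         return (pat, mid) if mid and mid != pat else None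
--
--     cands = [c for c in map(candidate, flag_patterns) if c is not None]
--     return max(cands, key=lambda c: len(c[0])) if cands else None
-- ===== Notes on version B (the rewrite author's own statement) =====
-- stated objective: alternative
-- what changed: Replaces A's sort-by-length-then-first-match with a two-stage pipeline: one pass maps every pattern to its qualifying (pat, corrected) candidate (with simplified slice arithmetic: start index pos instead of len(prefix), merged end formula), then max(key=len) selects the longest candidate with first-wins tie-break, eliminating the sort.
import Mathlib
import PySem

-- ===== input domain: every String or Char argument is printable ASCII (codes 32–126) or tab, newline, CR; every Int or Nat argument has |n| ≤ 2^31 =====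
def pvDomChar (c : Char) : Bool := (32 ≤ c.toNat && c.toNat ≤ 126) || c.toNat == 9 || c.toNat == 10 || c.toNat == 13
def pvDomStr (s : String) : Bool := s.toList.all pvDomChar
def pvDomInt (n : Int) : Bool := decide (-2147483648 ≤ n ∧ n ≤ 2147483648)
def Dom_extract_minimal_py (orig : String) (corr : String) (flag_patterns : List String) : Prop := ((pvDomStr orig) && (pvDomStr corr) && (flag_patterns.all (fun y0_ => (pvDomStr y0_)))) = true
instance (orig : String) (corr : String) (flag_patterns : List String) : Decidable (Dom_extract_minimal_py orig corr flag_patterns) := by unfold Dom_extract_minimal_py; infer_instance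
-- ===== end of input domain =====

-- B replaces A's sort-by-length-then-first-match with a two-stage pipeline (map every pattern to its
-- qualifying candidate, then max-by-length with first-wins tie-break): no sort, simplified slice indices.


-- ===== PORT A =====
-- A's for-loop over the length-sorted patterns: returns at the first qualifying pattern.
def extract_minimal_loopA (orig : String) (corr : String) : List String → Option (String × String)
  | [] => none
  | pat :: rest =>
    let pos := PySem.Str.find orig pat
    if pos = -1 then extract_minimal_loopA orig corr rest
    else
      let prefix_ := PySem.Str.slice orig none (some pos)
      let suffix := PySem.Str.slice orig (some (pos + PySem.Str.len pat)) none
      if PySem.Str.startswith corr prefix_ && (suffix == "" || PySem.Str.endswith corr suffix) then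
        let endIdx := if suffix ≠ "" then PySem.Str.len corr - PySem.Str.len suffix else PySem.Str.len corr
        let corr_pat := PySem.Str.slice corr (some (PySem.Str.len prefix_)) (some endIdx)
        if corr_pat ≠ "" ∧ corr_pat ≠ pat then some (pat, corr_pat)
        else extract_minimal_loopA orig corr rest
      else extract_minimal_loopA orig corr rest

def extract_minimal_py (orig : String) (corr : String) (flag_patterns : List String) : Option (String × String) :=
  if orig = corr ∨ orig = "" ∨ corr = "" then none
  else extract_minimal_loopA orig corr
    (PySem.List.sorted flag_patterns (fun p => PySem.Str.len p) true)

-- ===== PORT B =====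
-- B's `candidate(pat)`: the qualifying (pat, mid) pair, or None.
def extract_minimal_candB (orig : String) (corr : String) (pat : String) : Option (String × String) :=
  let pos := PySem.Str.find orig pat
  if pos = -1 then none
  else
    let after := PySem.Str.slice orig (some (pos + PySem.Str.len pat)) none
    if ¬ PySem.Str.startswith corr (PySem.Str.slice orig none (some pos)) ∨
        (after ≠ "" ∧ ¬ PySem.Str.endswith corr after) then none
    else
      let mid := PySem.Str.slice corr (some pos) (some (PySem.Str.len corr - PySem.Str.len after))
      if mid ≠ "" ∧ mid ≠ pat then some (pat, mid) else none

-- B's `max(cands, key=lambda c: len(c[0]))` on a nonempty list (Python max keeps the FIRST maximum).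
def extract_minimal_pickB : List (String × String) → Option (String × String)
  | [] => none
  | c :: cs => some (cs.foldl (fun b x => if PySem.Str.len x.1 > PySem.Str.len b.1 then x else b) c)

def extract_minimal_py_alt (orig : String) (corr : String) (flag_patterns : List String) : Option (String × String) :=
  if orig = corr ∨ orig = "" ∨ corr = "" then none
  else extract_minimal_pickB (flag_patterns.filterMap (extract_minimal_candB orig corr))

-- ===== PRECONDITION & SPEC =====
def Spec_extract_minimal_py (orig : String) (corr : String) (flag_patterns : List String) (out : Option (String × String)) : Prop := out = extract_minimal_py_alt orig corr flag_patterns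
instance (orig : String) (corr : String) (flag_patterns : List String) (out : Option (String × String)) : Decidable (Spec_extract_minimal_py orig corr flag_patterns out) := by unfold Spec_extract_minimal_py; infer_instance

-- ===== CLAIM (what is proved, stated in full; the proofs are below) =====
def Claim_equal_extract_minimal_py : Prop := ∀ (orig : String) (corr : String) (flag_patterns : List String), Dom_extract_minimal_py orig corr flag_patterns → Spec_extract_minimal_py orig corr flag_patterns (extract_minimal_py orig corr flag_patterns)

-- ===== LEMMAS AND PROOFS =====

-- The per-pattern qualification result, written exactly as A's loop body computes it.
def pvQ (orig corr : String) (pat : String) : Option (String × String) :=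
  let pos := PySem.Str.find orig pat
  if pos = -1 then none
  else
    let prefix_ := PySem.Str.slice orig none (some pos)
    let suffix := PySem.Str.slice orig (some (pos + PySem.Str.len pat)) none
    if PySem.Str.startswith corr prefix_ && (suffix == "" || PySem.Str.endswith corr suffix) then
      let endIdx := if suffix ≠ "" then PySem.Str.len corr - PySem.Str.len suffix else PySem.Str.len corr
      let corr_pat := PySem.Str.slice corr (some (PySem.Str.len prefix_)) (some endIdx)
      if corr_pat ≠ "" ∧ corr_pat ≠ pat then some (pat, corr_pat) else none
    else none

lemma len_nonneg (s : String) : 0 ≤ PySem.Str.len s := by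
  simp [PySem.Str.len_eq]

-- len(orig[:pos]) = pos when pos = orig.find(pat) ≠ -1.
-- len(orig[:pos]) = pos when pos = orig.find(pat) is a valid index bound.
lemma len_slice_prefix (s : String) (pos : Int) (h0 : 0 ≤ pos) (hle : pos ≤ (s.toList.length : Int)) :
    PySem.Str.len (PySem.Str.slice s none (some pos)) = pos := by
  rw [PySem.Str.len_eq, PySem.Str.toList_slice, PySem.Chars.slice_eq_listSlice,
    PySem.List.slice_to s.toList h0, List.length_take]
  omega

-- B's candidate equals A's qualification result.
lemma candB_eq_pvQ (orig corr : String) (pat : String) :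
    extract_minimal_candB orig corr pat = pvQ orig corr pat := by
  simp only [extract_minimal_candB, pvQ]
  by_cases h1 : PySem.Str.find orig pat = -1
  · rw [if_pos h1, if_pos h1]
  · rw [if_neg h1, if_neg h1]
    have hfe := PySem.Str.find_eq orig pat
    have h0 : 0 ≤ PySem.Str.find orig pat := by
      have h2 := PySem.Chars.neg_one_le_find orig.toList pat.toList
      rw [hfe] at h1 ⊢
      omega
    have hle : PySem.Str.find orig pat ≤ ((orig.toList.length : Int)) := by
      rw [hfe]; exact PySem.Chars.find_le_length orig.toList pat.toList
    have hlen := len_slice_prefix orig (PySem.Str.find orig pat) h0 hle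
    set pos := PySem.Str.find orig pat with hpos
    set after := PySem.Str.slice orig (some (pos + PySem.Str.len pat)) none with hafter
    set prefix_ := PySem.Str.slice orig none (some pos) with hpre
    have hend : (if after ≠ "" then PySem.Str.len corr - PySem.Str.len after else PySem.Str.len corr)
        = PySem.Str.len corr - PySem.Str.len after := by
      by_cases h : after = ""
      · rw [if_neg (by simp [h]), h]
        simp [PySem.Str.len_eq]
      · rw [if_pos h]
    by_cases hsw : PySem.Str.startswith corr prefix_ = true
    · by_cases hok : after = "" ∨ PySem.Str.endswith corr after = true
      · have hBnot : ¬(¬PySem.Str.startswith corr prefix_ = true ∨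
            (after ≠ "" ∧ ¬PySem.Str.endswith corr after = true)) := by
          rintro (h | ⟨hne, hew⟩)
          exacts [h hsw, hew (hok.resolve_left hne)]
        have hA' : (PySem.Str.startswith corr prefix_ &&
            (after == "" || PySem.Str.endswith corr after)) = true := by
          simp only [Bool.and_eq_true, Bool.or_eq_true, beq_iff_eq]
          exact ⟨hsw, hok⟩
        rw [hlen, hend, if_neg hBnot, if_pos hA']
      · have hAnot : ¬(PySem.Str.startswith corr prefix_ &&
            (after == "" || PySem.Str.endswith corr after)) = true := by
          simp only [Bool.and_eq_true, Bool.or_eq_true, beq_iff_eq]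
          rintro ⟨_, hor⟩
          exact hok hor
        rw [if_pos (Or.inr ⟨fun h => hok (Or.inl h), fun h => hok (Or.inr h)⟩),
          if_neg hAnot]
    · have hAnot : ¬(PySem.Str.startswith corr prefix_ &&
          (after == "" || PySem.Str.endswith corr after)) = true := by
        simp only [Bool.and_eq_true]
        rintro ⟨h, _⟩
        exact hsw h
      rw [if_pos (Or.inl hsw), if_neg hAnot]

lemma pvQ_fst (orig corr pat : String) (v : String × String) (h : pvQ orig corr pat = some v) :
    v.1 = pat := by
  simp only [pvQ] at h
  split_ifs at h <;> try simp_all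
  all_goals exact (congrArg Prod.fst h).symm

-- Length of the first qualifying pattern in a list (-1 if none).
def pvQLen (orig corr : String) : List String → Int
  | [] => -1
  | p :: rest => if (pvQ orig corr p).isSome then PySem.Str.len p else pvQLen orig corr rest

-- The best-so-far update step (semantics shared by B's pick and the sorted first-match).
def pvStep2 (b : Option (String × String) × Int) (v : String × String) :
    Option (String × String) × Int :=
  if PySem.Str.len v.1 > b.2 then (some v, PySem.Str.len v.1) else b

def pvG (orig corr : String) (acc : Option (String × String) × Int) (pat : String) :
    Option (String × String) × Int :=
  match pvQ orig corr pat with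
  | some v => if PySem.Str.len pat > acc.2 then (some v, PySem.Str.len pat) else acc
  | none => acc

lemma foldl_filterMap_pvG (orig corr : String) (l : List String)
    (init : Option (String × String) × Int) :
    (l.filterMap (pvQ orig corr)).foldl pvStep2 init = l.foldl (pvG orig corr) init := by
  induction l generalizing init with
  | nil => rfl
  | cons a l ih =>
    rw [List.filterMap_cons]
    cases h : pvQ orig corr a with
    | none => simp [h, List.foldl_cons, ih, pvG]
    | some v =>
      have hv := pvQ_fst orig corr a v h
      simp [h, List.foldl_cons, ih, pvG, pvStep2, hv]

lemma pick_fold (cs : List (String × String)) (b : String × String) :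
    cs.foldl pvStep2 (some b, PySem.Str.len b.1) =
      (some (cs.foldl (fun r x => if PySem.Str.len x.1 > PySem.Str.len r.1 then x else r) b),
       PySem.Str.len (cs.foldl (fun r x => if PySem.Str.len x.1 > PySem.Str.len r.1 then x else r) b).1) := by
  induction cs generalizing b with
  | nil => rfl
  | cons x cs ih =>
    rw [List.foldl_cons, List.foldl_cons]
    by_cases h : PySem.Str.len x.1 > PySem.Str.len b.1
    · rw [show pvStep2 (some b, PySem.Str.len b.1) x = (some x, PySem.Str.len x.1) from
        by unfold pvStep2; rw [if_pos h], if_pos h]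
      exact ih x
    · rw [show pvStep2 (some b, PySem.Str.len b.1) x = (some b, PySem.Str.len b.1) from
        by unfold pvStep2; rw [if_neg h], if_neg h]
      exact ih b

lemma pick_eq (cs : List (String × String)) :
    extract_minimal_pickB cs = (cs.foldl pvStep2 (none, -1)).1 := by
  cases cs with
  | nil => rfl
  | cons c cs =>
    have hc : pvStep2 (none, -1) c = (some c, PySem.Str.len c.1) := by
      unfold pvStep2
      rw [if_pos (by have := len_nonneg c.1; omega)]
    rw [List.foldl_cons, hc, pick_fold]
    rfl

-- ----- A-side: the sorted first-match as a fold with pvG -----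

lemma insertBy_cons {α : Type} (bef : α → α → Bool) (x y : α) (ys : List α) :
    PySem.List.insertBy bef x (y :: ys) =
      if bef x y then x :: y :: ys else y :: PySem.List.insertBy bef x ys := by
  simp only [PySem.List.insertBy]

lemma loopA_eq_findSome (orig corr : String) (l : List String) :
    extract_minimal_loopA orig corr l = l.findSome? (pvQ orig corr) := by
  induction l with
  | nil => rfl
  | cons pat rest ih =>
    simp only [extract_minimal_loopA, pvQ, List.findSome?]
    split_ifs <;> simp_all

lemma qlen_lt (orig corr : String) (l : List String) (c : Int)
    (hc : -1 < c) (h : ∀ p ∈ l, PySem.Str.len p < c) : pvQLen orig corr l < c := by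
  induction l with
  | nil => simpa [pvQLen]
  | cons p rest ih =>
    simp only [pvQLen]
    split
    · exact h p (by simp)
    · exact ih (fun q hq => h q (by simp [hq]))

lemma pvQLen_cons (orig corr p : String) (rest : List String) :
    pvQLen orig corr (p :: rest) =
      if (pvQ orig corr p).isSome then PySem.Str.len p else pvQLen orig corr rest := rfl

lemma findSome_cons_some {α β : Type} {f : α → Option β} {a : α} {b : β} (l : List α)
    (h : f a = some b) : (a :: l).findSome? f = some b := by
  simp [h]

lemma findSome_cons_none {α β : Type} {f : α → Option β} {a : α} (l : List α)
    (h : f a = none) : (a :: l).findSome? f = l.findSome? f := by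
  simp [h]

-- Inserting x into a length-descending list: the (first qualifier, its length) pair evolves
-- exactly as the strict-> best-so-far update.
lemma insert_invariant (orig corr : String) (x : String) (acc : List String)
    (hpw : acc.Pairwise (fun a b => PySem.Str.len b ≤ PySem.Str.len a)) :
    (let r := PySem.List.insertBy (fun a b => decide (PySem.Str.len b < PySem.Str.len a)) x acc
     (r.findSome? (pvQ orig corr), pvQLen orig corr r)) =
      match pvQ orig corr x with
      | some v =>
          if PySem.Str.len x > pvQLen orig corr acc then (some v, PySem.Str.len x)
          else (acc.findSome? (pvQ orig corr), pvQLen orig corr acc)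
      | none => (acc.findSome? (pvQ orig corr), pvQLen orig corr acc) := by
  induction acc with
  | nil =>
    have hx := len_nonneg x
    cases hq : pvQ orig corr x with
    | none => simp [PySem.List.insertBy, pvQLen, hq]
    | some v =>
      simp [PySem.List.insertBy, pvQLen, hq]
      omega
  | cons y ys ih =>
    have hpwt : ys.Pairwise (fun a b => PySem.Str.len b ≤ PySem.Str.len a) :=
      (List.pairwise_cons.mp hpw).2
    have hall : ∀ p ∈ ys, PySem.Str.len p ≤ PySem.Str.len y :=
      (List.pairwise_cons.mp hpw).1
    simp only []
    rw [insertBy_cons]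
    by_cases hlt : PySem.Str.len y < PySem.Str.len x
    · rw [if_pos (by simp [PySem.Str.len_eq] at hlt ⊢; omega)]
      have hql : pvQLen orig corr (y :: ys) < PySem.Str.len x := by
        apply qlen_lt
        · have := len_nonneg x; omega
        · intro p hp
          rw [List.mem_cons] at hp
          rcases hp with rfl | hp
          · exact hlt
          · exact lt_of_le_of_lt (hall p hp) hlt
      cases hq : pvQ orig corr x with
      | none =>
        rw [findSome_cons_none _ hq, pvQLen_cons, hq]
        rfl
      | some v =>
        rw [findSome_cons_some _ hq, pvQLen_cons, hq]
        show (some v, PySem.Str.len x) =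
          if PySem.Str.len x > pvQLen orig corr (y :: ys) then (some v, PySem.Str.len x)
          else ((y :: ys).findSome? (pvQ orig corr), pvQLen orig corr (y :: ys))
        rw [if_pos hql]
    · rw [if_neg (by simp [PySem.Str.len_eq] at hlt ⊢; omega)]
      cases hqy : pvQ orig corr y with
      | some w =>
        have hyl : pvQLen orig corr (y :: ys) = PySem.Str.len y := by
          rw [pvQLen_cons, hqy]; rfl
        have hcond : ¬ PySem.Str.len x > pvQLen orig corr (y :: ys) := by
          rw [hyl]; omega
        rw [findSome_cons_some _ hqy, findSome_cons_some _ hqy, pvQLen_cons, hqy, pvQLen_cons, hqy]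
        cases hq : pvQ orig corr x with
        | none => rfl
        | some v =>
          rw [hyl] at hcond
          show (some w, PySem.Str.len y) =
            if PySem.Str.len x > PySem.Str.len y then (some v, PySem.Str.len x)
            else (some w, PySem.Str.len y)
          rw [if_neg hcond]
      | none =>
        have hrec := ih hpwt
        simp only at hrec
        rw [findSome_cons_none _ hqy, findSome_cons_none _ hqy, pvQLen_cons, hqy,
          pvQLen_cons, hqy]
        simp only [Option.isSome_none, Bool.false_eq_true, if_false]
        exact hrec

lemma fold_eq_sorted (orig corr : String) (l : List String) :
    l.foldl (pvG orig corr) (none, -1) =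
      ((PySem.List.sorted l (fun p => PySem.Str.len p) true).findSome? (pvQ orig corr),
       pvQLen orig corr (PySem.List.sorted l (fun p => PySem.Str.len p) true)) := by
  induction l using List.reverseRecOn with
  | nil => rfl
  | append_singleton l x ih =>
    rw [List.foldl_append, List.foldl_cons, List.foldl_nil, ih]
    have hsort : PySem.List.sorted (l ++ [x]) (fun p => PySem.Str.len p) true
        = PySem.List.insertBy (fun a b => decide (PySem.Str.len b < PySem.Str.len a)) x
            (PySem.List.sorted l (fun p => PySem.Str.len p) true) := by
      rw [PySem.List.sorted_rev_eq_foldl_insertBy, PySem.List.sorted_rev_eq_foldl_insertBy,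
        List.foldl_append, List.foldl_cons, List.foldl_nil]
    rw [hsort]
    have h := insert_invariant orig corr x (PySem.List.sorted l (fun p => PySem.Str.len p) true)
      (PySem.List.sorted_pairwise_rev l (fun p => PySem.Str.len p))
    simp only at h
    rw [h]
    rfl

-- ===== VERDICT (by name: the statement is the Claim_ definition above) =====
theorem extract_minimal_py_spec : Claim_equal_extract_minimal_py := by
  intro orig corr flag_patterns _
  unfold Spec_extract_minimal_py extract_minimal_py extract_minimal_py_alt
  split_ifs
  · rfl
  · rw [loopA_eq_findSome]
    have hcand : extract_minimal_candB orig corr = pvQ orig corr :=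
      funext (candB_eq_pvQ orig corr)
    rw [hcand, pick_eq, foldl_filterMap_pvG, fold_eq_sorted]
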